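-- pv_equiv track=rewrite | github.com/VincentGourbin/meetingnotes | logic.py | apply_renaming
-- ===== SOURCE A (Python) =====
-- def apply_renaming(mapping_table, segments):
--     """
--     Met à jour les noms de locuteurs (old_speaker -> new_speaker)
--     """
--     # Si c'est un DataFrame, on le convertit en liste de listes
--     if hasattr(mapping_table, 'iloc'):
--         mapping_table = mapping_table.values.tolist()
--
--     # Création d’un dictionnaire pour le renommage
--     mapping_dict = {
--         row[0].strip(): row[1].strip()
--         for row in mapping_table
--         if row[1].strip()
--     }
--
--     # Application du renommage aux segments
--     for seg in segments:
--         if seg["speaker"] in mapping_dict and mapping_dict[seg["speaker"]]: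
--             seg["speaker"] = mapping_dict[seg["speaker"]]
--
--     return segments
-- ===== SOURCE B (Python) =====
-- def apply_renaming(mapping_table, segments):
--     """
--     Met à jour les noms de locuteurs (old_speaker -> new_speaker)
--     """
--     if hasattr(mapping_table, 'iloc'):
--         mapping_table = mapping_table.values.tolist()
--
--     # No mapping dict: for each segment, scan the table forward and remember
--     # the last matching row with a non-empty new name; rename only if found.
--     for seg in segments:
--         spk = seg["speaker"]
--         new_name = None
--         for row in mapping_table:
--             if row[0].strip() == spk and row[1].strip():
--                 new_name = row[1].strip()
--         if new_name is not None:
--             seg["speaker"] = new_name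
--     return segments
-- ===== Notes on version B (the rewrite author's own statement) =====
-- stated objective: alternative
-- what changed: B builds no mapping dict: for each segment it scans the mapping table forward with a last-match accumulator (last row whose stripped old name equals the speaker and whose stripped new name is non-empty) and renames only when one was found.
import Mathlib
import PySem

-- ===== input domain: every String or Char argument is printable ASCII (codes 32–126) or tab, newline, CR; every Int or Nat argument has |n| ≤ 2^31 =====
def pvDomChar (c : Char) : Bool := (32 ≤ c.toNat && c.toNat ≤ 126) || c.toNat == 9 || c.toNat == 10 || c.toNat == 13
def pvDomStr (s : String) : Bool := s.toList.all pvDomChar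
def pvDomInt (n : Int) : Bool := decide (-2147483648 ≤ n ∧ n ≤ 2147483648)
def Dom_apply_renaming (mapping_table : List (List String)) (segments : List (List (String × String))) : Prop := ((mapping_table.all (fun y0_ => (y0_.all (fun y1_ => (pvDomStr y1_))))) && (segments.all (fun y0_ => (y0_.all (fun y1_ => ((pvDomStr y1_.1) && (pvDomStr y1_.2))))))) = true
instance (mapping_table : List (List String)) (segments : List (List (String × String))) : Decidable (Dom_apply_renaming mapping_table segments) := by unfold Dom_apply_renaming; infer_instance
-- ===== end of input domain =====

-- B drops A's precomputed mapping dict: per segment it scans the table forward keeping the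
-- last matching non-empty new name in an Option accumulator (objective: alternative).
-- Both A and B mutate `segments` in place in Python; the equivalence proved is about the return value.


-- ===== PORT A =====
-- dict-comprehension body: row[1].strip() is evaluated first (the `if`), then row[0]
def pvStepA (d : PySem.Dict String String) (row : List String) : PySem.Dict String String :=
  match PySem.List.pyGet? row 1 with
  | none => d
  | some r1 =>
    if PySem.Str.strip r1 = "" then d
    else
      match PySem.List.pyGet? row 0 with
      | none => d
      | some r0 => d.insert (PySem.Str.strip r0) (PySem.Str.strip r1)

def apply_renaming (mapping_table : List (List String)) (segments : List (List (String × String))) : List (List (String × String)) :=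
  let mapping_dict : PySem.Dict String String := mapping_table.foldl pvStepA PySem.Dict.empty
  segments.map (fun seg =>
    match (PySem.Dict.mk seg).get? "speaker" with
    | none => seg                                   -- KeyError in Python; excluded by Pre_
    | some spk =>
      match mapping_dict.get? spk with
      | none => seg
      | some v =>
        if v = "" then seg
        else ((PySem.Dict.mk seg).insert "speaker" v).items)

-- ===== PORT B =====
-- inner `for row in mapping_table:` loop with the `new_name` accumulator (None = no match yet)
def pvStepB (spk : String) (new_name : Option String) (row : List String) : Option String :=
  match PySem.List.pyGet? row 0 with
  | none => new_name                                -- IndexError in Python; excluded by Pre_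
  | some r0 =>
    if PySem.Str.strip r0 = spk then
      match PySem.List.pyGet? row 1 with
      | none => new_name                            -- IndexError in Python; excluded by Pre_
      | some r1 => if PySem.Str.strip r1 = "" then new_name else some (PySem.Str.strip r1)
    else new_name

def apply_renaming_alt (mapping_table : List (List String)) : List (List (String × String)) → List (List (String × String))
  | [] => []
  | seg :: rest =>
    (match (PySem.Dict.mk seg).get? "speaker" with
     | none => seg                                  -- KeyError in Python; excluded by Pre_
     | some spk =>
       match mapping_table.foldl (pvStepB spk) none with
       | none => seg
       | some new_name => ((PySem.Dict.mk seg).insert "speaker" new_name).items)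
    :: apply_renaming_alt mapping_table rest

-- ===== PRECONDITION & SPEC =====
-- Pre_ excludes exactly the inputs where Python A raises: a mapping row with fewer than 2
-- entries (IndexError) or a segment without a "speaker" key (KeyError).
def Pre_apply_renaming (mapping_table : List (List String)) (segments : List (List (String × String))) : Prop :=
  (∀ row ∈ mapping_table, 2 ≤ row.length) ∧ (∀ seg ∈ segments, "speaker" ∈ seg.map (·.1))
instance (mapping_table : List (List String)) (segments : List (List (String × String))) : Decidable (Pre_apply_renaming mapping_table segments) := by unfold Pre_apply_renaming; infer_instance

def pvWitness_apply_renaming : List (List String) × (List (List (String × String))) :=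
  ([["alice ", " Bob"], ["carol", ""]], [[("speaker", "alice"), ("start", "0")], [("speaker", "carol")]])

def Spec_apply_renaming (mapping_table : List (List String)) (segments : List (List (String × String))) (out : List (List (String × String))) : Prop := out = apply_renaming_alt mapping_table segments
instance (mapping_table : List (List String)) (segments : List (List (String × String))) (out : List (List (String × String))) : Decidable (Spec_apply_renaming mapping_table segments out) := by unfold Spec_apply_renaming; infer_instance

-- ===== CLAIM (what is proved, stated in full; the proofs are below) =====
def Claim_equal_apply_renaming : Prop := ∀ (mapping_table : List (List String)) (segments : List (List (String × String))), Dom_apply_renaming mapping_table segments → Pre_apply_renaming mapping_table segments → Spec_apply_renaming mapping_table segments (apply_renaming mapping_table segments)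

-- ===== LEMMAS AND PROOFS =====

-- evaluating the literal row indices row[0] and row[1] on cons-shaped rows
lemma pyGet0_cons (a : String) (t : List String) : PySem.List.pyGet? (a :: t) 0 = some a := by
  rw [show ((0 : Int)) = ((0 : Nat) : Int) from rfl, PySem.List.pyGet?_natCast]; rfl

lemma pyGet1_cons2 (a b : String) (t : List String) : PySem.List.pyGet? (a :: b :: t) 1 = some b := by
  rw [show ((1 : Int)) = ((1 : Nat) : Int) from rfl, PySem.List.pyGet?_natCast]; rfl

lemma pyGet1_single (a : String) : PySem.List.pyGet? [a] 1 = none := by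
  rw [show ((1 : Int)) = ((1 : Nat) : Int) from rfl, PySem.List.pyGet?_natCast]; rfl

-- one fold step of A's dict build, looked up at spk, is one step of B's accumulator loop
lemma stepA_get (d : PySem.Dict String String) (row : List String) (spk : String) :
    (pvStepA d row).get? spk = pvStepB spk (d.get? spk) row := by
  unfold pvStepA pvStepB
  match row with
  | [] => simp [PySem.List.pyGet?, PySem.List.pyIdx?]
  | [r0] =>
    simp only [pyGet1_single, pyGet0_cons]
    split_ifs <;> rfl
  | r0 :: r1 :: rest =>
    simp only [pyGet1_cons2, pyGet0_cons]
    by_cases he : PySem.Str.strip r1 = ""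
    · simp [he]
    · by_cases hk : PySem.Str.strip r0 = spk
      · subst hk; simp [he, PySem.Dict.get?_insert_self]
      · simp [he, hk, PySem.Dict.get?_insert_of_ne _ _ (fun h => hk h.symm)]

-- A's dict lookup commutes with the whole fold: it IS B's forward accumulator scan
lemma foldl_stepA_get (mapping_table : List (List String)) (d : PySem.Dict String String) (spk : String) :
    (mapping_table.foldl pvStepA d).get? spk = mapping_table.foldl (pvStepB spk) (d.get? spk) := by
  induction mapping_table generalizing d with
  | nil => rfl
  | cons row rest ih => simp only [List.foldl_cons, ih, stepA_get]

-- B's accumulator never holds the empty string when started from a non-empty-or-none value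
lemma foldl_stepB_ne_empty (mapping_table : List (List String)) (spk : String) (acc : Option String)
    (hacc : ∀ v, acc = some v → v ≠ "") :
    ∀ v, mapping_table.foldl (pvStepB spk) acc = some v → v ≠ "" := by
  induction mapping_table generalizing acc with
  | nil => exact hacc
  | cons row rest ih =>
    intro v hv
    refine ih (pvStepB spk acc row) ?_ v hv
    intro w hw
    unfold pvStepB at hw
    match row with
    | [] => exact hacc w hw
    | r0 :: t =>
      simp only [pyGet0_cons] at hw
      by_cases hk : PySem.Str.strip r0 = spk
      · simp only [hk, if_true] at hw
        cases h1 : PySem.List.pyGet? (r0 :: t) 1 with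
        | none => simp only [h1] at hw; exact hacc w hw
        | some r1 =>
          simp only [h1] at hw
          by_cases he : PySem.Str.strip r1 = ""
          · rw [if_pos he] at hw; exact hacc w hw
          · rw [if_neg he] at hw; injection hw with h; exact h ▸ he
      · rw [if_neg hk] at hw; exact hacc w hw

-- ===== VERDICT (by name: the statement is the Claim_ definition above) =====
theorem apply_renaming_spec : Claim_equal_apply_renaming := by
  intro mapping_table segments hd hp
  clear hd hp
  unfold Spec_apply_renaming apply_renaming
  induction segments with
  | nil => rfl
  | cons seg rest ih =>
    simp only [List.map_cons, apply_renaming_alt]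
    refine congrArg₂ _ ?_ ih
    cases (PySem.Dict.mk seg).get? "speaker" with
    | none => rfl
    | some spk =>
      simp only [foldl_stepA_get, PySem.Dict.get?_empty]
      cases hf : mapping_table.foldl (pvStepB spk) none with
      | none => rfl
      | some v =>
        have hne : v ≠ "" := foldl_stepB_ne_empty mapping_table spk none (by simp) v hf
        simp [hne]
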